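-- pv_equiv track=rewrite | github.com/kenhuang1204/stanCode_projects | stanCode_projects/hangman_game/similarity.py | find_homology
-- ===== SOURCE A (Python) =====
-- def find_homology(long, short):
--     """
--     :param long: str, the long sequence to be compared
--     :param short: str, the short sequence to be compared
--     :return: str, the homology of the long and shor sequence
--     """
--     l1=len(long)
--     l2=len(short)
--     subsequence1=long[0:len(short)]
--     score1=0
--     # score1=the matching result of the comparison of the first subsequence of long
--     for i in range(len(short)):
--         base1=subsequence1[i]
--         base2=short[i]
--         if base1==base2:
--             score1+=1
--     maximum=score1
--     match = subsequence1
--     for i in range(1,l1-l2+1):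
--         # l1-l2+1 = Total number of subsequence sets for comparison
--         subsequence=long[0+i:l2+i]
--         score = 0
--         # The compared subsequence of long sequence
--         for j in range(len(short)):
--             # len(short) = Number of characters compared in each subsequence set
--             base1=subsequence[j]
--             base2=short[j]
--             if base1==base2:
--                 score+=1
--         if score>maximum:
--             maximum=score
--             match=subsequence
--     return match
-- ===== SOURCE B (Python) =====
-- def find_homology(long, short):
--     """Sparse correlation: bucket the positions of each character of short,
--     scatter-add one pass over long into a per-offset score table, then take
--     the first offset with the maximal score."""
--     n = len(long)
--     m = len(short)
--     pos = {}
--     for k in range(m):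
--         pos.setdefault(short[k], []).append(k)
--     scores = [0] * (n - m + 1)
--     for j in range(n):
--         for k in pos.get(long[j], ()):
--             off = j - k
--             if 0 <= off <= n - m:
--                 scores[off] += 1
--     best = 0
--     for off in range(1, n - m + 1):
--         if scores[off] > scores[best]:
--             best = off
--     return long[best:best + m]
-- ===== Notes on version B (the rewrite author's own statement) =====
-- stated objective: alternative
-- what changed: Replaced the nested sliding-window rescan with a sparse correlation: bucket the positions of each character of short once, make one pass over long scatter-adding into a per-offset score table, then pick the first offset with maximal score (cheap when characters of long occur rarely in short, but pays O(n*m) even when there are few windows).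
import Mathlib
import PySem

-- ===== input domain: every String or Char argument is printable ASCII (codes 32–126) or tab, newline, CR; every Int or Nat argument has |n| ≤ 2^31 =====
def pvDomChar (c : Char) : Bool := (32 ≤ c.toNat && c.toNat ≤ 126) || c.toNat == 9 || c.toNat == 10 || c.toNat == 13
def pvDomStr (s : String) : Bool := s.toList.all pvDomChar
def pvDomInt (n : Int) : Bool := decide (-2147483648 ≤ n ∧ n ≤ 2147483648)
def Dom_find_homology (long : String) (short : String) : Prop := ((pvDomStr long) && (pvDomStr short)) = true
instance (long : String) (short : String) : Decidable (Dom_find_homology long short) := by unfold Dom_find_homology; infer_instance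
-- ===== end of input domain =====

-- B replaces A's nested sliding-window rescan by a sparse per-character scatter of match
-- counts into an offset table (alternative algorithm of the same exact result).

-- ===== PORT A =====
-- the per-window inner loop 'for i in range(len(short)): if subsequence[i]==short[i]: score+=1';
-- indexing is in range under Pre_, where List.getD is exact for Python's subsequence[i]
def pvScoreA (sub short : List Char) : Nat :=
  (List.range short.length).foldl
    (fun s i => if sub.getD i ' ' = short.getD i ' ' then s + 1 else s) 0

def pvFindA (long short : List Char) : List Char :=
  let l1 := long.length
  let l2 := short.length
  let subsequence1 := long.take l2            -- long[0:len(short)]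
  let score1 := pvScoreA subsequence1 short
  ((List.range' 1 (l1 - l2)).foldl            -- range(1, l1-l2+1)
    (fun (acc : Nat × List Char) i =>
      let sub := (long.drop i).take l2        -- long[0+i:l2+i]
      let score := pvScoreA sub short
      if score > acc.1 then (score, sub) else acc)
    (score1, subsequence1)).2

def find_homology (long : String) (short : String) : String :=
  String.ofList (pvFindA long.toList short.toList)

-- ===== PORT B =====
-- pos.setdefault(short[k], []).append(k)  ==  d[c] = d.get(c, []) ++ [k]  ==  Dict.modify
def pvPos (short : List Char) : PySem.Dict Char (List Nat) :=
  (List.range short.length).foldl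
    (fun d k => d.modify (short.getD k ' ') [] (· ++ [k])) PySem.Dict.empty

-- the scores table: scores = [0]*(n-m+1); one pass over long scatter-adding matches.
-- guard 'k ≤ j ∧ j - k ≤ n - m' is Python's '0 <= off <= n - m' for off = j - k (Nat subtraction)
def pvScatter (long : List Char) (pos : PySem.Dict Char (List Nat)) (n m : Nat) : List Nat :=
  (List.range n).foldl
    (fun sc j =>
      (pos.getD (long.getD j ' ') []).foldl
        (fun sc k => if k ≤ j ∧ j - k ≤ n - m then sc.modify (j - k) (· + 1) else sc) sc)
    (List.replicate (n - m + 1) 0)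

def pvFindB (long short : List Char) : List Char :=
  let n := long.length
  let m := short.length
  let scores := pvScatter long (pvPos short) n m
  let best := (List.range' 1 (n - m)).foldl   -- range(1, n-m+1)
    (fun b off => if scores.getD off 0 > scores.getD b 0 then off else b) 0
  (long.drop best).take m                     -- long[best:best+m]

def find_homology_alt (long : String) (short : String) : String :=
  String.ofList (pvFindB long.toList short.toList)

-- ===== PRECONDITION & SPEC =====
-- A raises IndexError (subsequence1[i]) exactly when short is longer than long; Pre_ excludes that.
def Pre_find_homology (long : String) (short : String) : Prop :=
  short.toList.length ≤ long.toList.length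
instance (long : String) (short : String) : Decidable (Pre_find_homology long short) := by
  unfold Pre_find_homology; infer_instance

def pvWitness_find_homology : String × String := ("agctga", "gc")

def Spec_find_homology (long : String) (short : String) (out : String) : Prop := out = find_homology_alt long short
instance (long : String) (short : String) (out : String) : Decidable (Spec_find_homology long short out) := by unfold Spec_find_homology; infer_instance

-- ===== CLAIM (what is proved, stated in full; the proofs are below) =====
def Claim_equal_find_homology : Prop := ∀ (long : String) (short : String), Dom_find_homology long short → Pre_find_homology long short → Spec_find_homology long short (find_homology long short)

-- ===== LEMMAS AND PROOFS =====

-- the common score function: number of positions of short matching long at offset o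
def pvS (long short : List Char) (o : Nat) : Nat :=
  (List.range short.length).countP (fun k => long.getD (o + k) ' ' == short.getD k ' ')

-- partial score: only positions of long strictly before j contribute
def pvT (long short : List Char) (j o : Nat) : Nat :=
  (List.range short.length).countP
    (fun k => decide (o + k < j) && (long.getD (o + k) ' ' == short.getD k ' '))

theorem pv_foldl_count (l : List Nat) (p : Nat → Prop) [DecidablePred p] (a : Nat) :
    l.foldl (fun s i => if p i then s + 1 else s) a = a + l.countP (fun i => decide (p i)) := by
  induction l generalizing a with
  | nil => simp
  | cons x xs ih => simp [List.countP_cons, ih]; split <;> omega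

theorem pv_window_getD (long : List Char) (o m i : Nat) (hi : i < m) :
    ((long.drop o).take m).getD i ' ' = long.getD (o + i) ' ' := by
  simp [List.getD, List.getElem?_drop, hi]

theorem pv_scoreA_eq_S (long short : List Char) (o : Nat) :
    pvScoreA ((long.drop o).take short.length) short = pvS long short o := by
  unfold pvScoreA pvS
  rw [pv_foldl_count _ (fun i => ((long.drop o).take short.length).getD i ' ' = short.getD i ' ')]
  simp only [Nat.zero_add]
  refine List.countP_congr ?_
  intro k hk
  rw [List.mem_range] at hk
  rw [pv_window_getD long o short.length k hk]
  simp [beq_iff_eq]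

theorem pv_pos_getD (short : List Char) (c : Char) :
    (pvPos short).getD c [] =
      (List.range short.length).filter (fun k => short.getD k ' ' == c) := by
  unfold pvPos
  induction short.length with
  | zero => simp [PySem.Dict.getD_empty]
  | succ t ih =>
    rw [List.range_succ, List.foldl_append, List.foldl_cons, List.foldl_nil,
        List.filter_append, PySem.Dict.getD_modify]
    by_cases h : c = short.getD t ' '
    · rw [if_pos h, ← h, ih]
      have ht : (short.getD t ' ' == c) = true := by simp [h]
      simp only [List.filter_cons, List.filter_nil, ht]
      simp
    · rw [if_neg h, ih]
      have ht : (short.getD t ' ' == c) = false := by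
        simp only [beq_eq_false_iff_ne, ne_eq]
        exact fun hh => h hh.symm
      simp only [List.filter_cons, List.filter_nil, ht]
      simp

theorem pv_inner_length (j nm : Nat) (ks sc : List Nat) :
    (ks.foldl (fun sc k => if k ≤ j ∧ j - k ≤ nm then sc.modify (j - k) (· + 1) else sc) sc).length
      = sc.length := by
  induction ks generalizing sc with
  | nil => rfl
  | cons k ks ih =>
    rw [List.foldl_cons, ih]
    split <;> simp [List.length_modify]

theorem pv_modify_getD (sc : List Nat) (i o : Nat) :
    (sc.modify i (· + 1)).getD o 0 =
      sc.getD o 0 + (if o = i ∧ i < sc.length then 1 else 0) := by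
  simp only [List.getD, List.getElem?_modify]
  by_cases h : i = o
  · subst h
    by_cases hl : i < sc.length
    · simp [hl]
    · simp [hl]
  · cases hx : sc[o]? <;> simp [h, Ne.symm h]

theorem pv_inner_getD (j nm : Nat) (ks sc : List Nat) (o : Nat) :
    (ks.foldl (fun sc k => if k ≤ j ∧ j - k ≤ nm then sc.modify (j - k) (· + 1) else sc) sc).getD o 0
      = sc.getD o 0 +
        ks.countP (fun k => decide (k ≤ j ∧ j - k ≤ nm ∧ j - k = o ∧ o < sc.length)) := by
  induction ks generalizing sc with
  | nil => simp
  | cons k ks ih =>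
    rw [List.foldl_cons, List.countP_cons]
    by_cases hg : k ≤ j ∧ j - k ≤ nm
    · rw [if_pos hg, ih, pv_modify_getD, List.length_modify]
      by_cases hk : j - k = o ∧ o < sc.length
      · have : (decide (k ≤ j ∧ j - k ≤ nm ∧ j - k = o ∧ o < sc.length)) = true := by
          simp only [decide_eq_true_eq]
          exact ⟨hg.1, hg.2, hk.1, hk.2⟩
        rw [this]
        have : (o = j - k ∧ j - k < sc.length) := ⟨hk.1.symm, hk.1 ▸ hk.2⟩
        simp [this]
        omega
      · have hd : (decide (k ≤ j ∧ j - k ≤ nm ∧ j - k = o ∧ o < sc.length)) = false := by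
          simp only [decide_eq_false_iff_not]; tauto
        rw [hd]
        have : ¬ (o = j - k ∧ j - k < sc.length) := by
          intro ⟨h1, h2⟩; exact hk ⟨h1.symm, h1 ▸ h2⟩
        simp [this]
    · rw [if_neg hg, ih]
      have hd : (decide (k ≤ j ∧ j - k ≤ nm ∧ j - k = o ∧ o < sc.length)) = false := by
        simp only [decide_eq_false_iff_not]; tauto
      rw [hd]
      simp

theorem pv_countP_or_disjoint {α : Type} (l : List α) (p q r : α → Bool)
    (h : ∀ x ∈ l, r x = (p x || q x) ∧ ¬(p x = true ∧ q x = true)) :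
    l.countP r = l.countP p + l.countP q := by
  induction l with
  | nil => simp
  | cons x xs ih =>
    have hx := h x (by simp)
    rw [List.countP_cons, List.countP_cons, List.countP_cons,
        ih (fun y hy => h y (List.mem_cons_of_mem x hy)), hx.1]
    rcases hp : p x <;> rcases hq : q x <;> simp_all <;> omega

theorem pv_outer_length (long : List Char) (pos : PySem.Dict Char (List Nat)) (nm : Nat) :
    ∀ (j : Nat) (sc : List Nat),
      ((List.range j).foldl (fun sc j =>
        (pos.getD (long.getD j ' ') []).foldl
          (fun sc k => if k ≤ j ∧ j - k ≤ nm then sc.modify (j - k) (· + 1) else sc) sc) sc).length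
        = sc.length := by
  intro j
  induction j with
  | zero => intro sc; rfl
  | succ t ih =>
    intro sc
    rw [List.range_succ, List.foldl_append, List.foldl_cons, List.foldl_nil,
        pv_inner_length, ih]

theorem pv_scatter_aux (long short : List Char) (n m : Nat)
    (_hmn : m ≤ n) :
    ∀ (j o : Nat), o ≤ n - m →
      ((List.range j).foldl (fun sc j =>
        ((pvPos short).getD (long.getD j ' ') []).foldl
          (fun sc k => if k ≤ j ∧ j - k ≤ n - m then sc.modify (j - k) (· + 1) else sc) sc)
        (List.replicate (n - m + 1) 0)).getD o 0 = pvT long short j o := by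
  intro j
  induction j with
  | zero =>
    intro o hlt
    unfold pvT
    simp [List.getD, Nat.lt_succ_of_le hlt]
  | succ t ih =>
    intro o hlt
    rw [List.range_succ, List.foldl_append, List.foldl_cons, List.foldl_nil,
        pv_inner_getD, ih o hlt]
    have hL : ((List.range t).foldl (fun sc j =>
        ((pvPos short).getD (long.getD j ' ') []).foldl
          (fun sc k => if k ≤ j ∧ j - k ≤ n - m then sc.modify (j - k) (· + 1) else sc) sc)
        (List.replicate (n - m + 1) 0)).length = n - m + 1 := by
      rw [pv_outer_length]; simp
    rw [hL, pv_pos_getD, List.countP_filter]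
    have hsplit : (List.range short.length).countP
          (fun k => decide (o + k < t + 1) && (long.getD (o + k) ' ' == short.getD k ' '))
        = (List.range short.length).countP
            (fun k => decide (o + k < t) && (long.getD (o + k) ' ' == short.getD k ' '))
          + (List.range short.length).countP
            (fun k => decide (k ≤ t ∧ t - k ≤ n - m ∧ t - k = o ∧ o < n - m + 1) &&
              (short.getD k ' ' == long.getD t ' ')) := by
      apply pv_countP_or_disjoint
      intro k hk
      constructor
      · rw [Bool.eq_iff_iff]
        simp only [Bool.and_eq_true, Bool.or_eq_true, decide_eq_true_eq, beq_iff_eq]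
        constructor
        · rintro ⟨h1, h2⟩
          by_cases he : o + k < t
          · exact Or.inl ⟨he, h2⟩
          · have het : o + k = t := by omega
            refine Or.inr ⟨⟨by omega, by omega, by omega, by omega⟩, ?_⟩
            rw [← het]; exact h2.symm
        · rintro (⟨h1, h2⟩ | ⟨⟨h1, h2, h3, h4⟩, h5⟩)
          · exact ⟨by omega, h2⟩
          · have het : o + k = t := by omega
            refine ⟨by omega, ?_⟩
            rw [het]; exact h5.symm
      · simp only [Bool.and_eq_true, decide_eq_true_eq, beq_iff_eq, not_and]
        rintro ⟨h1, _⟩ ⟨h2, h3, h4, _⟩ _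
        omega
    unfold pvT
    rw [hsplit]

theorem pv_scatter_getD (long short : List Char) (n m : Nat)
    (_hn : n = long.length) (_hm : m = short.length) (hmn : m ≤ n) (o : Nat) (ho : o ≤ n - m) :
    (pvScatter long (pvPos short) n m).getD o 0 = pvT long short n o := by
  unfold pvScatter
  exact pv_scatter_aux long short n m hmn n o ho

theorem pv_T_eq_S (long short : List Char) (n m : Nat)
    (hn : n = long.length) (hm : m = short.length) (hmn : m ≤ n) (o : Nat) (ho : o ≤ n - m) :
    pvT long short n o = pvS long short o := by
  unfold pvT pvS
  refine List.countP_congr ?_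
  intro k hk
  rw [List.mem_range] at hk
  have : o + k < n := by omega
  simp [this]

theorem pv_select (long short : List Char) (n m : Nat) (scores : List Nat)
    (hm : m = short.length)
    (hsc : ∀ o, o ≤ n - m → scores.getD o 0 = pvS long short o) :
    ∀ (l : List Nat) (b : Nat), (∀ i ∈ l, i ≤ n - m) → b ≤ n - m →
      (l.foldl
        (fun (acc : Nat × List Char) i =>
          let sub := (long.drop i).take m
          let score := pvScoreA sub short
          if score > acc.1 then (score, sub) else acc)
        (pvS long short b, (long.drop b).take m))
      = (pvS long short (l.foldl (fun b off => if scores.getD off 0 > scores.getD b 0 then off else b) b),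
         (long.drop (l.foldl (fun b off => if scores.getD off 0 > scores.getD b 0 then off else b) b)).take m) := by
  subst hm
  intro l
  induction l with
  | nil => intro b _ _; rfl
  | cons i l ih =>
    intro b hmem hb
    have hi : i ≤ n - short.length := hmem i (by simp)
    rw [List.foldl_cons, List.foldl_cons]
    have hstep : (let sub := (long.drop i).take short.length
          let score := pvScoreA sub short
          if score > (pvS long short b, (long.drop b).take short.length).1 then (score, sub)
          else (pvS long short b, (long.drop b).take short.length))
        = if pvS long short i > pvS long short b
          then (pvS long short i, (long.drop i).take short.length)
          else (pvS long short b, (long.drop b).take short.length) := by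
      simp only [pv_scoreA_eq_S]
    have hstep2 : (if scores.getD i 0 > scores.getD b 0 then i else b)
        = if pvS long short i > pvS long short b then i else b := by
      rw [hsc i hi, hsc b hb]
    rw [hstep, hstep2]
    by_cases hc : pvS long short i > pvS long short b
    · rw [if_pos hc, if_pos hc]
      exact ih i (fun x hx => hmem x (List.mem_cons_of_mem i hx)) hi
    · rw [if_neg hc, if_neg hc]
      exact ih b (fun x hx => hmem x (List.mem_cons_of_mem i hx)) hb

theorem pv_list_eq (long short : List Char)
    (h : short.length ≤ long.length) :
    pvFindA long short = pvFindB long short := by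
  have hsc : ∀ o, o ≤ long.length - short.length →
      (pvScatter long (pvPos short) long.length short.length).getD o 0 = pvS long short o := by
    intro o ho
    rw [pv_scatter_getD long short _ _ rfl rfl h o ho,
        pv_T_eq_S long short _ _ rfl rfl h o ho]
  have hmem : ∀ i ∈ List.range' 1 (long.length - short.length),
      i ≤ long.length - short.length := by
    intro i hi
    rw [List.mem_range'] at hi
    obtain ⟨v, hv, rfl⟩ := hi
    omega
  have hsel := pv_select long short long.length short.length
      (pvScatter long (pvPos short) long.length short.length) rfl hsc
      (List.range' 1 (long.length - short.length)) 0 hmem (by omega)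
  simp only [pvFindA, pvFindB]
  rw [show long.take short.length = (long.drop 0).take short.length from by
        rw [List.drop_zero],
      show pvScoreA ((long.drop 0).take short.length) short = pvS long short 0 from
        pv_scoreA_eq_S long short 0,
      hsel]

-- ===== VERDICT (by name: the statement is the Claim_ definition above) =====
theorem find_homology_spec : Claim_equal_find_homology := by
  intro long short _ hpre
  unfold Spec_find_homology find_homology find_homology_alt
  rw [pv_list_eq _ _ hpre]
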